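-- pv_equiv track=rewrite | github.com/KOTYA8/PiFMPSRT | demo/pifmpsrt/ps_scroll.py | scroll_cs
-- ===== SOURCE A (Python) =====
-- def scroll_cs(text: str):
--     """
--     Center scroll (cs) — появление текста из середины.
--     Работает с любым количеством символов.
--     """
--     buf = [" "] * 8
--     chars = list(text)
--     idx = 0
--     while idx < len(chars):
--         if idx < 8:
--             buf[idx] = chars[idx]
--         else:
--             buf = buf[1:] + [" "]
--             buf[-1] = chars[idx]
--         yield "".join(buf)
--         idx += 1
--     for _ in range(8):
--         buf = buf[1:] + [" "]
--         yield "".join(buf)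
-- ===== SOURCE B (Python) =====
-- def scroll_cs(text: str):
--     # Same frames as A, computed by direct slicing instead of a shift-register buffer.
--     n = len(text)
--     for idx in range(n):
--         yield text[max(0, idx - 7):idx + 1].ljust(8)
--     base = text[max(0, n - 8):].ljust(8)
--     for j in range(1, 9):
--         yield base[j:].ljust(8)
-- ===== Notes on version B (the rewrite author's own statement) =====
-- stated objective: simpler
-- what changed: Replaced the mutable 8-char shift-register buffer with direct positional string slicing: each frame is text[max(0,idx-7):idx+1].ljust(8), and the flush frames are left-shifts of the ljust'ed final window.
import Mathlib
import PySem

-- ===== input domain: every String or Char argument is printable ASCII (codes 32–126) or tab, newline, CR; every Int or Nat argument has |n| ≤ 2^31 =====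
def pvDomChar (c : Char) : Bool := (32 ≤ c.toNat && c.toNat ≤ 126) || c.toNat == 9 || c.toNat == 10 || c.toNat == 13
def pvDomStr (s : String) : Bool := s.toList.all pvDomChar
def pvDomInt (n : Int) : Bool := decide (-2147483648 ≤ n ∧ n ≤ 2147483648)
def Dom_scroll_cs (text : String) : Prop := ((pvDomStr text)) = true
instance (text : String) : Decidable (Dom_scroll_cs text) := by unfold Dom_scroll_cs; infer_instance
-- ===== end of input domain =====

-- B computes each 8-char frame by direct slicing instead of maintaining A's mutable shift-register buffer (simpler decomposition, same cost).


-- ===== PORT A =====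
-- A's while-loop: state is (buf, idx); each step yields one frame. Recursion on n - idx.
def scrollLoopA (chars : List Char) (buf : List Char) (idx : Nat) : List String × List Char :=
  if h : idx < chars.length then
    let buf' :=
      if idx < 8 then
        buf.set idx chars[idx]
      else
        -- buf = buf[1:] + [" "]; buf[-1] = chars[idx]
        let b := buf.drop 1 ++ [' ']
        b.set (b.length - 1) chars[idx]
    let rest := scrollLoopA chars buf' (idx + 1)
    (String.mk buf' :: rest.1, rest.2)
  else ([], buf)
termination_by chars.length - idx

-- A's final flush: for _ in range(8): buf = buf[1:] + [" "]; yield "".join(buf)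
def flushLoopA (buf : List Char) : Nat → List String
  | 0 => []
  | k + 1 =>
    let buf' := buf.drop 1 ++ [' ']
    String.mk buf' :: flushLoopA buf' k

def scroll_cs (text : String) : List String :=
  let r := scrollLoopA text.toList (List.replicate 8 ' ') 0
  r.1 ++ flushLoopA r.2 8

-- ===== PORT B =====
-- exact port of Python str.ljust(8) on a char list: pad with spaces on the right to length 8
def pvLjust8 (l : List Char) : List Char := l ++ List.replicate (8 - l.length) ' '

-- text[max(0, idx-7) : idx+1] is (take (idx+1)).drop (idx-7) (Nat subtraction = Python's max(0, ·))
def scroll_cs_alt (text : String) : List String :=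
  let cs := text.toList
  let n := cs.length
  let main := (List.range n).map (fun idx => String.mk (pvLjust8 ((cs.take (idx + 1)).drop (idx - 7))))
  let base := pvLjust8 (cs.drop (n - 8))
  let tail := (List.range' 1 8).map (fun j => String.mk (pvLjust8 (base.drop j)))
  main ++ tail

-- ===== PRECONDITION & SPEC =====
def Spec_scroll_cs (text : String) (out : List String) : Prop := out = scroll_cs_alt text
instance (text : String) (out : List String) : Decidable (Spec_scroll_cs text out) := by unfold Spec_scroll_cs; infer_instance

-- ===== CLAIM (what is proved, stated in full; the proofs are below) =====
def Claim_equal_scroll_cs : Prop := ∀ (text : String), Dom_scroll_cs text → Spec_scroll_cs text (scroll_cs text)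

-- ===== LEMMAS AND PROOFS =====

lemma pvLjust8_length_of_le {l : List Char} (h : l.length ≤ 8) : (pvLjust8 l).length = 8 := by
  simp [pvLjust8]; omega

lemma pvLjust8_of_length_eq {l : List Char} (h : l.length = 8) : pvLjust8 l = l := by
  simp [pvLjust8, h]

-- the step: A's buffer update preserves the invariant buf = pvLjust8 ((take idx).drop (idx-8))
lemma bufStep (chars : List Char) (idx : Nat) (h : idx < chars.length) :
    (if idx < 8 then
        (pvLjust8 ((chars.take idx).drop (idx - 8))).set idx chars[idx]
      else
        let b := (pvLjust8 ((chars.take idx).drop (idx - 8))).drop 1 ++ [' ']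
        b.set (b.length - 1) chars[idx])
      = pvLjust8 ((chars.take (idx + 1)).drop (idx + 1 - 8)) := by
  have htake : chars.take (idx + 1) = chars.take idx ++ [chars[idx]] :=
    List.take_succ_eq_append_getElem h
  have hlen : (chars.take idx).length = idx := by
    simp [List.length_take]; omega
  by_cases h8 : idx < 8
  · simp only [if_pos h8]
    have h0 : idx - 8 = 0 := by omega
    have h0' : idx + 1 - 8 = 0 := by omega
    rw [h0, h0', List.drop_zero, List.drop_zero, htake]
    have hpad : (8 : Nat) - idx = (8 - (idx + 1)) + 1 := by omega
    simp [pvLjust8, hlen, hpad, List.replicate_succ]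
    have hmin : min (idx + 1) chars.length = idx + 1 := by omega
    have h71 : 8 - (idx + 1) = 7 - idx := by omega
    rw [hmin, h71, htake]
    simp only [List.append_assoc, List.singleton_append]
  · simp only [if_neg h8]
    have hd : ((chars.take idx).drop (idx - 8)).length = 8 := by
      simp [hlen]; omega
    rw [pvLjust8_of_length_eq hd]
    have hd' : ((chars.take (idx + 1)).drop (idx + 1 - 8)).length = 8 := by
      rw [htake]; simp; omega
    rw [pvLjust8_of_length_eq hd']
    show (((chars.take idx).drop (idx - 8)).drop 1 ++ [' ']).set
        ((((chars.take idx).drop (idx - 8)).drop 1 ++ [' ']).length - 1) chars[idx]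
      = (chars.take (idx + 1)).drop (idx + 1 - 8)
    have h1 : (((chars.take idx).drop (idx - 8)).drop 1).length = 7 := by
      simp; omega
    have hset : ∀ (l : List Char) (x c : Char), l.length = 7 →
        (l ++ [x]).set ((l ++ [x]).length - 1) c = l ++ [c] := by
      intro l x c hl
      simp [hl]
    rw [hset _ _ _ h1]
    rw [htake]
    have h2 : idx + 1 - 8 = idx - 7 := by omega
    rw [h2, List.drop_append_of_le_length (by rw [hlen]; omega), List.drop_drop]
    congr 2
    omega

-- main loop invariant, by induction on the remaining fuel
lemma scrollLoopA_aux (chars : List Char) (k : Nat) : ∀ (idx : Nat),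
    chars.length - idx = k → idx ≤ chars.length →
    scrollLoopA chars (pvLjust8 ((chars.take idx).drop (idx - 8))) idx =
      ((List.range' idx (chars.length - idx)).map
          (fun i => String.mk (pvLjust8 ((chars.take (i + 1)).drop (i - 7)))),
        pvLjust8 (chars.drop (chars.length - 8))) := by
  induction k with
  | zero =>
    intro idx hk hle
    have hidx : idx = chars.length := by omega
    rw [scrollLoopA]
    rw [dif_neg (by omega)]
    subst hidx
    simp [List.take_length]
  | succ k ih =>
    intro idx hk hle
    have h : idx < chars.length := by omega
    rw [scrollLoopA, dif_pos h, bufStep chars idx h]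
    show (String.mk (pvLjust8 ((chars.take (idx + 1)).drop (idx + 1 - 8))) ::
        (scrollLoopA chars (pvLjust8 ((chars.take (idx + 1)).drop (idx + 1 - 8))) (idx + 1)).1,
      (scrollLoopA chars (pvLjust8 ((chars.take (idx + 1)).drop (idx + 1 - 8))) (idx + 1)).2) = _
    rw [ih (idx + 1) (by omega) (by omega)]
    have hr : chars.length - idx = (chars.length - (idx + 1)) + 1 := by omega
    rw [hr, List.range'_succ]
    have h2 : idx + 1 - 8 = idx - 7 := by omega
    simp [h2]

-- flush of a length-8 buffer, expanded elementwise
lemma flush_of_length_eight (l : List Char) (hl : l.length = 8) :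
    flushLoopA l 8 =
      (List.range' 1 8).map (fun j => String.mk (pvLjust8 (l.drop j))) := by
  rcases l with _ | ⟨a, _ | ⟨b, _ | ⟨c, _ | ⟨d, _ | ⟨e, _ | ⟨f, _ | ⟨g, _ | ⟨h, _ | ⟨i, t⟩⟩⟩⟩⟩⟩⟩⟩⟩ <;>
    first
      | rfl
      | simp at hl

-- ===== VERDICT (by name: the statement is the Claim_ definition above) =====
theorem scroll_cs_spec : Claim_equal_scroll_cs := by
  intro text _
  unfold Spec_scroll_cs scroll_cs scroll_cs_alt
  show (scrollLoopA text.toList (List.replicate 8 ' ') 0).1 ++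
      flushLoopA (scrollLoopA text.toList (List.replicate 8 ' ') 0).2 8 =
    (List.range text.toList.length).map
        (fun idx => String.mk (pvLjust8 ((text.toList.take (idx + 1)).drop (idx - 7)))) ++
      (List.range' 1 8).map
        (fun j => String.mk (pvLjust8 ((pvLjust8 (text.toList.drop (text.toList.length - 8))).drop j)))
  have h0 : (List.replicate 8 ' ' : List Char) =
      pvLjust8 ((text.toList.take 0).drop (0 - 8)) := rfl
  rw [h0, scrollLoopA_aux text.toList (text.toList.length - 0) 0 rfl (Nat.zero_le _)]
  have hbase : (pvLjust8 (text.toList.drop (text.toList.length - 8))).length = 8 :=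
    pvLjust8_length_of_le (by simp; omega)
  rw [flush_of_length_eight _ hbase]
  simp [List.range_eq_range']
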